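-- pv_equiv track=rewrite | github.com/YuningZhang7/py2 | cleaning data with code/scotland_local_clean.py | find_postcode_col
-- ===== SOURCE A (Python) =====
-- def find_postcode_col(columns: list) -> str | None:
--     """
--     Identifies the column name containing postcodes from a list of columns.
--     Handles variations in naming conventions
--
--     Args:
--     columns (list): A list of column names from the dataframe.
--
--     Returns:
--     str | None: The detected column name, or None if not found.
--     """
--     #Check for exact match
--     for col in columns:
--         if col.strip().lower() == "postcode":
--             return col
--
--     #Check for partial match containing both keywords
--     for col in columns:
--         lower_col = col.lower()
--         if "post" in lower_col and "code" in lower_col: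
--             return col
--
--     return None
-- ===== SOURCE B (Python) =====
-- def find_postcode_col(columns: list) -> str | None:
--     """Single pass: return an exact match immediately; remember the first
--     partial match ('post' and 'code' both in the lowered name) as fallback."""
--     fallback = None
--     for col in columns:
--         if col.strip().lower() == "postcode":
--             return col
--         if fallback is None:
--             lower_col = col.lower()
--             if "post" in lower_col and "code" in lower_col:
--                 fallback = col
--     return fallback
-- ===== Notes on version B (the rewrite author's own statement) =====
-- stated objective: simpler
-- what changed: Collapses A's two scans into one pass that returns on an exact match and remembers the first partial match as a fallback returned after the loop.
import Mathlib
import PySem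

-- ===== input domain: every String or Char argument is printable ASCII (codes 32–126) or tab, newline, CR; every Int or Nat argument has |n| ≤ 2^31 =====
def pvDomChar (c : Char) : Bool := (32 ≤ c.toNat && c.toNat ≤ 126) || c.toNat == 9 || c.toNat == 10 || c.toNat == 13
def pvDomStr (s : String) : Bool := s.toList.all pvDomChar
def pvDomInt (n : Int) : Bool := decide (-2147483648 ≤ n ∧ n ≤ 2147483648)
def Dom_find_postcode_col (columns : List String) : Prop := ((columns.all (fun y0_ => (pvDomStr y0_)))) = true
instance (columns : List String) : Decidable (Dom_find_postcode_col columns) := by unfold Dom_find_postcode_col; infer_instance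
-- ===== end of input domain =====

-- B collapses A's two scans into one pass with a remembered first partial match; objective: simpler.

-- ===== PORT A =====
-- exact-match test of A's first loop
def pvExact (col : String) : Bool :=
  PySem.Str.lower (PySem.Str.strip col) == "postcode"

-- partial-match test of A's second loop (lower_col computed, then both substring tests)
def pvPartial (col : String) : Bool :=
  let lower_col := PySem.Str.lower col
  PySem.Str.isIn "post" lower_col && PySem.Str.isIn "code" lower_col

-- two scans: first loop returns the first exact match, else second loop returns the first partial match
def find_postcode_col (columns : List String) : Option String :=
  match columns.find? pvExact with
  | some col => some col
  | none => columns.find? pvPartial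

-- ===== PORT B =====
-- single pass of Source B: return on exact match, carry the first partial match as fallback
def pvGoB : List String → Option String → Option String
  | [], fallback => fallback
  | col :: rest, fallback =>
    if pvExact col then some col
    else pvGoB rest (if fallback.isNone && pvPartial col then some col else fallback)

def find_postcode_col_alt (columns : List String) : Option String :=
  pvGoB columns none

-- ===== PRECONDITION & SPEC =====
def Spec_find_postcode_col (columns : List String) (out : Option String) : Prop := out = find_postcode_col_alt columns
instance (columns : List String) (out : Option String) : Decidable (Spec_find_postcode_col columns out) := by unfold Spec_find_postcode_col; infer_instance

-- ===== CLAIM (what is proved, stated in full; the proofs are below) =====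
def Claim_equal_find_postcode_col : Prop := ∀ (columns : List String), Dom_find_postcode_col columns → Spec_find_postcode_col columns (find_postcode_col columns)

-- ===== LEMMAS AND PROOFS =====
-- Characterisation of B's loop: first exact match if any, else the carried fallback, else the first partial match.
theorem pvGoB_eq (cs : List String) : ∀ fb : Option String,
    pvGoB cs fb = match cs.find? pvExact with
      | some c => some c
      | none => match fb with
        | some x => some x
        | none => cs.find? pvPartial := by
  induction cs with
  | nil => intro fb; cases fb <;> simp [pvGoB]
  | cons c rest ih =>
    intro fb
    by_cases he : pvExact c
    · simp [pvGoB, he, List.find?_cons_of_pos]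
    · cases fb with
      | some x =>
        rw [show pvGoB (c :: rest) (some x) = pvGoB rest (some x) by simp [pvGoB, he], ih]
        simp [he]
      | none =>
        by_cases hp : pvPartial c
        · rw [show pvGoB (c :: rest) none = pvGoB rest (some c) by simp [pvGoB, he, hp], ih]
          simp [he, hp]
        · rw [show pvGoB (c :: rest) none = pvGoB rest none by simp [pvGoB, he, hp], ih]
          simp [he, hp]

-- ===== VERDICT (by name: the statement is the Claim_ definition above) =====
theorem find_postcode_col_spec : Claim_equal_find_postcode_col := by
  intro columns _
  unfold Spec_find_postcode_col find_postcode_col find_postcode_col_alt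
  rw [pvGoB_eq]
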